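-- pv_equiv track=rewrite | github.com/shallgrimson/Coursera-Data-Structures-and-Algorithms-Specialization | Algorithmic Toolbox Course/Week 3/course_1_w3.py | max_num_prizes
-- ===== SOURCE A (Python) =====
-- def max_num_prizes(num):
--     if num == 0:
--         return 0
--
--     prizeSplit = []
--     curSum, prevSum = 0, 0 #count number of prizes already split up
--
--     for i in range(1, num+1):
--         curSum = curSum + i
--         if num - curSum <= i:
--             prizeSplit.append(num-prevSum)
--             return prizeSplit
--
--         prizeSplit.append(i)
--         prevSum = curSum
-- ===== SOURCE B (Python) =====
-- def max_num_prizes(num):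
--     if num == 0:
--         return 0
--     # binary search for the largest k with k*(k+1)//2 <= num
--     lo, hi = 1, num + 1  # invariant: lo*(lo+1)//2 <= num < hi*(hi+1)//2
--     while hi - lo > 1:
--         mid = (lo + hi) // 2
--         if mid * (mid + 1) // 2 <= num:
--             lo = mid
--         else:
--             hi = mid
--     return list(range(1, lo)) + [num - lo * (lo - 1) // 2]
-- ===== Notes on version B (the rewrite author's own statement) =====
-- stated objective: alternative
-- what changed: Replaces A's linear running-sum loop (which accumulates curSum/prevSum over range(1, num+1) with an early return) by a binary search for the largest k with k*(k+1)//2 <= num, then emits list(range(1, k)) plus the remainder num - k*(k-1)//2 in closed form.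
-- outside the precondition, e.g. on max_num_prizes(0): A returns 0, B returns 0; on max_num_prizes(-3): A returns None, B returns [-3]
import Mathlib
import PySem

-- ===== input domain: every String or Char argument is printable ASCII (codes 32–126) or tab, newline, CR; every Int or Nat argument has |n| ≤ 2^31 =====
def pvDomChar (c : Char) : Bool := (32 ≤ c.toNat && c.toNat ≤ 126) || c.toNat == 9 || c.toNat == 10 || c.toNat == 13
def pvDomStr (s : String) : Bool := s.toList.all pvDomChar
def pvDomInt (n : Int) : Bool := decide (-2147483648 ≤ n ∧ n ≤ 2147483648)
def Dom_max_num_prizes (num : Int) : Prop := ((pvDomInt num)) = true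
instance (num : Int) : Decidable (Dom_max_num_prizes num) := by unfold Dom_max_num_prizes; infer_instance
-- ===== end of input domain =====

-- B replaces A's linear running-sum loop by a binary search for the cut point k (alternative loop structure, fewer iterations to find k).
-- Pre_ excludes num ≤ 0: A returns the int 0 (not a list) for num == 0 and returns None for negative num.


-- ===== PORT A =====
-- the for-loop with its early return: state is (prevSum, prizeSplit); curSum = prev + i is recomputed each step
def maxNumPrizesLoop (num : Int) : List Int → Int → List Int → List Int
  | [], _, acc => acc            -- loop falls off: Python returns None; unreachable inside Pre_
  | i :: rest, prev, acc =>
      let cur := prev + i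
      if num - cur ≤ i then acc ++ [num - prev]
      else maxNumPrizesLoop num rest cur (acc ++ [i])

def max_num_prizes (num : Int) : List Int :=
  if num = 0 then []             -- Python returns the int 0 here (not a list); excluded by Pre_
  else maxNumPrizesLoop num (PySem.List.pyRange 1 (num + 1) 1) 0 []

-- ===== PORT B =====
-- while hi - lo > 1: binary search for the largest k with k*(k+1)//2 <= num
def maxNumPrizesBS (num lo hi : Int) : Int :=
  if _h : 1 < hi - lo then
    let mid := PySem.Int.floordiv (lo + hi) 2
    if PySem.Int.floordiv (mid * (mid + 1)) 2 ≤ num then maxNumPrizesBS num mid hi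
    else maxNumPrizesBS num lo mid
  else lo
termination_by (hi - lo).toNat
decreasing_by
  · have h1 : lo + 1 ≤ PySem.Int.floordiv (lo + hi) 2 :=
      (PySem.Int.le_floordiv_iff_mul_le (by omega)).mpr (by omega)
    omega
  · have h2 : PySem.Int.floordiv (lo + hi) 2 < hi :=
      (PySem.Int.floordiv_lt_iff_lt_mul (by omega)).mpr (by omega)
    omega

def max_num_prizes_alt (num : Int) : List Int :=
  if num = 0 then []             -- Python returns the int 0 here (not a list); excluded by Pre_
  else
    let lo := maxNumPrizesBS num 1 (num + 1)
    PySem.List.pyRange 1 lo 1 ++ [num - PySem.Int.floordiv (lo * (lo - 1)) 2]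

-- ===== PRECONDITION & SPEC =====
-- Pre_ excludes num ≤ 0, where Python A returns no List value: the int 0 at num == 0, None for num < 0.
def Pre_max_num_prizes (num : Int) : Prop := 1 ≤ num
instance (num : Int) : Decidable (Pre_max_num_prizes num) := by unfold Pre_max_num_prizes; infer_instance
def pvWitness_max_num_prizes : Int := (7)

def Spec_max_num_prizes (num : Int) (out : List Int) : Prop := out = max_num_prizes_alt num
instance (num : Int) (out : List Int) : Decidable (Spec_max_num_prizes num out) := by unfold Spec_max_num_prizes; infer_instance

-- ===== CLAIM (what is proved, stated in full; the proofs are below) =====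
def Claim_equal_max_num_prizes : Prop := ∀ (num : Int), Dom_max_num_prizes num → Pre_max_num_prizes num → Spec_max_num_prizes num (max_num_prizes num)

-- ===== LEMMAS AND PROOFS =====

-- a*(a+1) is even, as a witness c with a*(a+1) = 2*c
lemma pvMulSuccEven (a : Int) : ∃ c, a * (a + 1) = 2 * c := by
  rcases Int.even_mul_succ_self a with ⟨c, hc⟩
  exact ⟨c, by omega⟩

lemma pvFloordivHalfEven (c : Int) : PySem.Int.floordiv (2 * c) 2 = c := by
  rw [PySem.Int.floordiv_eq_iff_of_pos (by omega)]; omega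

-- the binary search returns k with lo ≤ k, k*(k+1) ≤ 2*num < (k+1)*(k+2)
lemma pvBsInvariant (num : Int) : ∀ (m : Nat) (lo hi : Int), (hi - lo).toNat = m →
    lo < hi → lo * (lo + 1) ≤ 2 * num → 2 * num < hi * (hi + 1) →
    lo ≤ maxNumPrizesBS num lo hi ∧
    maxNumPrizesBS num lo hi * (maxNumPrizesBS num lo hi + 1) ≤ 2 * num ∧
    2 * num < (maxNumPrizesBS num lo hi + 1) * (maxNumPrizesBS num lo hi + 2) := by
  intro m
  induction m using Nat.strong_induction_on with
  | _ m ih =>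
    intro lo hi hm hlt hlo hhi
    rw [maxNumPrizesBS]
    by_cases h : 1 < hi - lo
    · simp only [h, dite_true]
      set mid := PySem.Int.floordiv (lo + hi) 2 with hmid
      have hmid1 : lo + 1 ≤ mid :=
        (PySem.Int.le_floordiv_iff_mul_le (by omega)).mpr (by omega)
      have hmid2 : mid < hi :=
        (PySem.Int.floordiv_lt_iff_lt_mul (by omega)).mpr (by omega)
      rcases pvMulSuccEven mid with ⟨c, hc⟩
      have hfd : PySem.Int.floordiv (mid * (mid + 1)) 2 = c := by
        rw [hc, pvFloordivHalfEven]
      by_cases hcond : PySem.Int.floordiv (mid * (mid + 1)) 2 ≤ num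
      · simp only [hcond, if_true]
        have hle : mid * (mid + 1) ≤ 2 * num := by rw [hfd] at hcond; omega
        obtain ⟨h1, h2, h3⟩ := ih ((hi - mid).toNat) (by omega) mid hi rfl (by omega) hle hhi
        exact ⟨by omega, h2, h3⟩
      · simp only [hcond, if_false]
        have hgt : 2 * num < mid * (mid + 1) := by rw [hfd] at hcond; omega
        exact ih ((mid - lo).toNat) (by omega) lo mid rfl (by omega) hlo hgt
    · simp only [h, dite_false]
      have heq : hi = lo + 1 := by omega
      subst heq
      refine ⟨le_refl _, hlo, ?_⟩
      have : (lo + 1) * (lo + 1 + 1) = (lo + 1) * (lo + 2) := by ring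
      omega

-- the A-loop, started at i with 2*prev = i*(i-1), emits i, i+1, …, k-1 and then num - pk
lemma pvLoopA (num k pk : Int) (hk1 : 1 ≤ k) (hkl : k * (k + 1) ≤ 2 * num)
    (hkh : 2 * num < (k + 1) * (k + 2)) (hpk : 2 * pk = k * (k - 1)) :
    ∀ (m : Nat) (i prev : Int) (acc : List Int), 1 ≤ i → i ≤ k → (k - i).toNat = m →
      2 * prev = i * (i - 1) →
      maxNumPrizesLoop num (PySem.List.pyRange i (num + 1) 1) prev acc
        = acc ++ PySem.List.pyRange i k 1 ++ [num - pk] := by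
  have hknum : k ≤ num := by nlinarith [mul_nonneg (by omega : (0:Int) ≤ k) (by omega : (0:Int) ≤ k - 1)]
  intro m
  induction m with
  | zero =>
    intro i prev acc hi1 hik hm hprev
    have hik' : i = k := by omega
    subst hik'
    rw [PySem.List.pyRange_one_cons (by omega), maxNumPrizesLoop]
    have e0 : (i + 1) * (i + 2) = i * (i - 1) + 4 * i + 2 := by ring
    have e1 : 2 * num < 2 * prev + 4 * i + 2 := by linarith
    rw [if_pos (by omega)]
    have hpp : prev = pk := by omega
    rw [hpp, PySem.List.pyRange_one_eq_nil (le_refl i)]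
    simp
  | succ m ih =>
    intro i prev acc hi1 hik hm hprev
    have hilt : i < k := by omega
    rw [PySem.List.pyRange_one_cons (by omega), maxNumPrizesLoop]
    have hmono : (i + 1) * (i + 2) ≤ k * (k + 1) :=
      mul_le_mul (by omega) (by omega) (by omega) (by omega)
    have e0 : (i + 1) * (i + 2) = i * (i - 1) + 4 * i + 2 := by ring
    have e1 : 2 * prev + 4 * i + 2 ≤ 2 * num := by linarith
    rw [if_neg (by omega)]
    rw [ih (i + 1) (prev + i) (acc ++ [i]) (by omega) (by omega) (by omega)
        (by linear_combination hprev)]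
    rw [PySem.List.pyRange_one_cons (a := i) (b := k) hilt]
    simp

-- ===== VERDICT (by name: the statement is the Claim_ definition above) =====
theorem max_num_prizes_spec : Claim_equal_max_num_prizes := by
  intro num _ hpre
  have hnum : 1 ≤ num := hpre
  unfold Spec_max_num_prizes max_num_prizes max_num_prizes_alt
  rw [if_neg (by omega : ¬ num = 0), if_neg (by omega : ¬ num = 0)]
  obtain ⟨hk1, hkl, hkh⟩ := pvBsInvariant num (num + 1 - 1).toNat 1 (num + 1) rfl (by omega)
    (by omega) (by nlinarith [sq_nonneg num])
  set k := maxNumPrizesBS num 1 (num + 1) with hk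
  rcases pvMulSuccEven (k - 1) with ⟨c, hc⟩
  have hfd : PySem.Int.floordiv (k * (k - 1)) 2 = c := by
    have e : k * (k - 1) = 2 * c := by linear_combination hc
    rw [e, pvFloordivHalfEven]
  show maxNumPrizesLoop num (PySem.List.pyRange 1 (num + 1) 1) 0 []
      = PySem.List.pyRange 1 k 1 ++ [num - PySem.Int.floordiv (k * (k - 1)) 2]
  rw [hfd]
  have := pvLoopA num k c hk1 hkl hkh (by linear_combination -hc) (k - 1).toNat 1 0 []
    (by omega) hk1 rfl (by ring)
  simpa using this
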